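-- pv_equiv track=rewrite | github.com/muratgozel/deployment-server | src/deployment_server/packages/utils/validators.py | nginx_upstream_name
-- ===== SOURCE A (Python) =====
-- nginx_upstream_name_allowed_chars = tuple("abcdefghijklmnopqrstuvwxyz_0123456789")
--
-- def nginx_upstream_name(name: str):
--     if isinstance(name, str):
--         try:
--             encoded = name.encode("utf-8")
--             decoded = encoded.decode("utf-8")
--             result = decoded == name
--             if (
--                 result
--                 and all(char in nginx_upstream_name_allowed_chars for char in name)
--                 and not name.startswith(("_", "-"))
--                 and not name.endswith(("-", "_"))
--             ):
--                 return True
--         except UnicodeError: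
--             return False
--     return False
-- ===== SOURCE B (Python) =====
-- # Validates an nginx upstream name by running a 4-state finite automaton over the string.
-- _NGINX_DFA_ALNUM = frozenset("abcdefghijklmnopqrstuvwxyz0123456789")
--
-- def _nginx_step(state, ch):
--     # states: 0 = start (empty accepted), 1 = last char alnum (accept),
--     #         2 = last char '_' (reject at end), 3 = dead (reject)
--     if state == 3:
--         return 3
--     if ch in _NGINX_DFA_ALNUM:
--         return 1
--     if ch == "_":
--         return 3 if state == 0 else 2
--     return 3
--
-- def nginx_upstream_name(name):
--     if not isinstance(name, str):
--         return False
--     state = 0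
--     for ch in name:
--         state = _nginx_step(state, ch)
--     return state in (0, 1)
-- ===== Notes on version B (the rewrite author's own statement) =====
-- stated objective: alternative
-- what changed: Replaces the UTF-8 round-trip, allowed-tuple membership scan and startswith/endswith tuple checks with a single left-to-right fold of an explicit 4-state finite automaton (start / alnum-seen / underscore-seen / dead), accepting in the start and alnum-seen states.
import Mathlib
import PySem

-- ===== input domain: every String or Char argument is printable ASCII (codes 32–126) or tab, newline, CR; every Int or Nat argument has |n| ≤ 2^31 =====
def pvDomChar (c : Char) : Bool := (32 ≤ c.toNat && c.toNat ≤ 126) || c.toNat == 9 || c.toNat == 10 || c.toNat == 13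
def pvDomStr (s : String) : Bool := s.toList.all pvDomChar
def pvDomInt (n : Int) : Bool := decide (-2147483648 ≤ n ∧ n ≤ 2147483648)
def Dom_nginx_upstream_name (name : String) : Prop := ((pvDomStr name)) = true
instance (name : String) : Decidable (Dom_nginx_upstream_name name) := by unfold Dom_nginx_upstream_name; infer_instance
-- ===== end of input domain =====

-- B replaces A's UTF-8 round-trip + allowed-tuple scan + startswith/endswith tuple checks
-- by a single fold of an explicit 4-state finite automaton: an alternative decomposition, same O(n) cost.


-- ===== PORT A =====
def nginx_upstream_name_allowed_chars : List Char := "abcdefghijklmnopqrstuvwxyz_0123456789".toList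

def nginx_upstream_name (name : String) : Bool :=
  -- name.encode('utf-8').decode('utf-8') is the identity on every Lean String (valid Unicode), so decoded = name; exact here
  let decoded := name
  let result := decoded == name
  if result
      && name.toList.all (fun c => nginx_upstream_name_allowed_chars.contains c)
      && !(PySem.Str.startswith name "_" || PySem.Str.startswith name "-")
      && !(PySem.Str.endswith name "-" || PySem.Str.endswith name "_")
  then true
  else false

-- ===== PORT B =====
def pvNginxAlnum : List Char := "abcdefghijklmnopqrstuvwxyz0123456789".toList

-- states: 0 = start (empty accepted), 1 = last char alnum (accept), 2 = last char '_', 3 = dead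
def pvNginxStep (state : Nat) (ch : Char) : Nat :=
  if state == 3 then 3
  else if pvNginxAlnum.contains ch then 1
  else if ch == '_' then (if state == 0 then 3 else 2)
  else 3

def nginx_upstream_name_alt (name : String) : Bool :=
  let state := name.toList.foldl pvNginxStep 0
  state == 0 || state == 1

-- ===== PRECONDITION & SPEC =====
def Spec_nginx_upstream_name (name : String) (out : Bool) : Prop := out = nginx_upstream_name_alt name
instance (name : String) (out : Bool) : Decidable (Spec_nginx_upstream_name name out) := by unfold Spec_nginx_upstream_name; infer_instance

-- ===== CLAIM (what is proved, stated in full; the proofs are below) =====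
def Claim_equal_nginx_upstream_name : Prop := ∀ (name : String), Dom_nginx_upstream_name name → Spec_nginx_upstream_name name (nginx_upstream_name name)

-- ===== LEMMAS AND PROOFS =====
theorem pv_allowed_eq (d : Char) :
    nginx_upstream_name_allowed_chars.contains d = (pvNginxAlnum.contains d || d == '_') := by
  have hp : nginx_upstream_name_allowed_chars.Perm ('_' :: pvNginxAlnum) := by decide
  rw [Bool.eq_iff_iff]
  simp only [List.contains_iff_mem, Bool.or_eq_true, beq_iff_eq, hp.mem_iff, List.mem_cons]
  tauto

theorem pv_alnum_not_underscore (d : Char) (h : d ∈ pvNginxAlnum) : d ≠ '_' := by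
  intro rfl_h; subst rfl_h; exact absurd h (by decide)

theorem pv_alnum_not_dash (d : Char) (h : d ∈ pvNginxAlnum) : d ≠ '-' := by
  intro rfl_h; subst rfl_h; exact absurd h (by decide)

theorem pv_dead (m : List Char) : m.foldl pvNginxStep 3 = 3 := by
  induction m with
  | nil => rfl
  | cons x xs ihx => simpa [pvNginxStep] using ihx

-- states 1 and 2 have identical outgoing transitions, so they agree after consuming at least one char
theorem pv_step12 (d : Char) (ds : List Char) :
    (d :: ds).foldl pvNginxStep 1 = (d :: ds).foldl pvNginxStep 2 := by
  simp only [List.foldl_cons]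
  by_cases h1 : pvNginxAlnum.contains d
  · simp [pvNginxStep, h1]
  · by_cases h2 : d = '_' <;> simp [pvNginxStep, h1, h2]

-- characterisation of the automaton run from the "alnum seen" state
theorem pv_run1 (l : List Char) :
    l.foldl pvNginxStep 1 =
      if l.all (fun d => pvNginxAlnum.contains d || d == '_') then
        (if l.getLast?.any (· == '_') then 2 else 1)
      else 3 := by
  induction l with
  | nil => rfl
  | cons c cs ih =>
      simp only [List.foldl_cons]
      by_cases h1 : c ∈ pvNginxAlnum
      · have hcu : ¬ c = '_' := pv_alnum_not_underscore c h1
        rw [show pvNginxStep 1 c = 1 by simp [pvNginxStep, h1], ih]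
        cases cs with
        | nil => simp [h1, hcu]
        | cons d ds => simp [List.getLast?_cons_cons, h1]
      · by_cases h2 : c = '_'
        · subst h2
          rw [show pvNginxStep 1 '_' = 2 by simp [pvNginxStep, h1]]
          cases cs with
          | nil => decide
          | cons d ds => rw [← pv_step12 d ds, ih]; simp [List.getLast?_cons_cons]
        · rw [show pvNginxStep 1 c = 3 by simp [pvNginxStep, h1, h2], pv_dead]
          have hf : ((c :: cs).all (fun d => pvNginxAlnum.contains d || d == '_')) = false := by
            simp [List.all_cons, h1, h2]
          rw [hf]
          simp

-- the DFA run on a nonempty string equals the direct first/last/all-chars test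
theorem pv_alt_cons (c : Char) (cs : List Char) :
    (((c :: cs).foldl pvNginxStep 0 == 0) || ((c :: cs).foldl pvNginxStep 0 == 1))
    = (pvNginxAlnum.contains c
        && pvNginxAlnum.contains ((c :: cs).getLast (by simp))
        && (c :: cs).all (fun d => pvNginxAlnum.contains d || d == '_')) := by
  simp only [List.foldl_cons]
  by_cases h1 : c ∈ pvNginxAlnum
  · rw [show pvNginxStep 0 c = 1 by simp [pvNginxStep, h1], pv_run1]
    by_cases hall : cs.all (fun d => pvNginxAlnum.contains d || d == '_')
    · rw [if_pos hall]
      cases hcs : cs with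
      | nil =>
          have hcu : ¬ c = '_' := pv_alnum_not_underscore c h1
          simp [h1, hcu]
      | cons d ds =>
          subst hcs
          rw [List.getLast_cons_cons]
          have hlast? : (d :: ds).getLast? = some ((d :: ds).getLast (by simp)) := by
            simp [List.getLast?_eq_some_getLast]
          rw [hlast?]
          have hla : (d :: ds).getLast (by simp) ∈ pvNginxAlnum
              ∨ (d :: ds).getLast (by simp) = '_' := by
            have := (List.all_eq_true.mp hall) _ (List.getLast_mem (l := d :: ds) (by simp))
            simpa using this
          by_cases hl : (d :: ds).getLast (by simp) = '_'
          · have hnu : ('_' : Char) ∉ pvNginxAlnum := by decide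
            simp [hl, hnu]
          · have hla' : (d :: ds).getLast (by simp) ∈ pvNginxAlnum := by
              rcases hla with ha | ha
              · exact ha
              · exact absurd ha hl
            have hallm := List.all_eq_true.mp hall
            rw [if_neg (by simp [hl])]
            simp [h1, hla']
            exact ⟨by simpa using hallm d (by simp),
              fun x hx => by simpa using hallm x (by simp [hx])⟩
    · rw [if_neg hall]
      have hex : ∃ x ∈ cs, x ∉ pvNginxAlnum ∧ ¬ x = '_' := by simpa using hall
      simp [List.all_cons]
      exact fun _ _ _ => hex
  · have hstep : pvNginxStep 0 c = 3 := by
      by_cases h2 : c = '_' <;>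
        simp [pvNginxStep, h1, h2, (by decide : ('_' : Char) ∉ pvNginxAlnum)]
    rw [hstep, pv_dead]
    simp [h1]

theorem pv_startswith_cons (x c : Char) (cs : List Char) :
    PySem.Chars.startswith (c :: cs) [x] = (c == x) := by
  rw [Bool.eq_iff_iff, PySem.Chars.startswith_iff]
  simp only [List.cons_prefix_cons, List.nil_prefix, and_true, beq_iff_eq]
  exact eq_comm

theorem pv_suffix_singleton (x c : Char) (cs : List Char) :
    ([x] <:+ (c :: cs)) ↔ (c :: cs).getLast (by simp) = x := by
  induction cs generalizing c with
  | nil =>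
      rw [List.suffix_cons_iff]
      constructor
      · rintro (h | h)
        · injection h with h1 _; simp [h1]
        · simp at h
      · intro h
        left
        simp only [List.getLast_singleton] at h
        rw [h]
  | cons d rest ih =>
      rw [List.suffix_cons_iff, List.getLast_cons_cons, ih d]
      constructor
      · rintro (h | h)
        · have := congrArg List.length h; simp at this
        · exact h
      · exact Or.inr

theorem pv_endswith_cons (x c : Char) (cs : List Char) :
    PySem.Chars.endswith (c :: cs) [x] = ((c :: cs).getLast (by simp) == x) := by
  rw [Bool.eq_iff_iff, PySem.Chars.endswith_iff, pv_suffix_singleton]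
  simp

-- ===== VERDICT (by name: the statement is the Claim_ definition above) =====
theorem nginx_upstream_name_spec : Claim_equal_nginx_upstream_name := by
  intro name _
  unfold Spec_nginx_upstream_name nginx_upstream_name nginx_upstream_name_alt
  simp only [beq_self_eq_true, Bool.true_and, PySem.Str.startswith_eq, PySem.Str.endswith_eq]
  have hu : ("_" : String).toList = ['_'] := rfl
  have hd : ("-" : String).toList = ['-'] := rfl
  rw [hu, hd]
  cases h : name.toList with
  | nil => decide
  | cons c cs =>
      rw [pv_startswith_cons, pv_startswith_cons, pv_endswith_cons, pv_endswith_cons]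
      rw [pv_alt_cons]
      rw [Bool.if_true_left]
      rw [Bool.eq_iff_iff]
      simp only [Bool.and_eq_true, Bool.not_eq_true', Bool.or_eq_false_iff,
        List.all_eq_true, List.contains_iff_mem, Bool.or_eq_true, beq_iff_eq, beq_eq_false_iff_ne,
        ne_eq, pv_allowed_eq]
      simp only [decide_eq_true_eq, Bool.false_eq_true, or_false]
      constructor
      · rintro ⟨⟨hall, hcu, _⟩, _, hzu⟩
        have hc := hall c (by simp)
        have hz := hall _ (List.getLast_mem (by simp))
        refine ⟨⟨?_, ?_⟩, hall⟩
        · rcases hc with hm | hm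
          · exact hm
          · exact absurd hm hcu
        · rcases hz with hm | hm
          · exact hm
          · exact absurd hm hzu
      · rintro ⟨⟨hc, hz⟩, hall⟩
        exact ⟨⟨hall, pv_alnum_not_underscore c hc, pv_alnum_not_dash c hc⟩,
          pv_alnum_not_dash _ hz, pv_alnum_not_underscore _ hz⟩
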